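-- pv_equiv track=rewrite | github.com/Asteraceaeaa/school | ege/23/webium/1.py | f
-- ===== SOURCE A (Python) =====
-- def f(start, end, c = 0):
--     if start > end:
--         return 0
--     elif start == end and c == 7:
--         return 1
--     elif start == end:
--         return 0
--     return f(start + 1, end, c + 1) + f(start + 4, end, c + 1) + f(start * 2, end, c + 1)
-- ===== SOURCE B (Python) =====
-- def f(start, end, c=0):
--     # Level-by-level DP on a counter of reachable values instead of a 3-way recursion tree.
--     if start > end:
--         return 0
--     if start == end:
--         return 1 if c == 7 else 0
--     if c >= 7:
--         return 0
--     frontier = {start: 1}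
--     for _ in range(7 - c):
--         if not frontier:
--             break
--         nxt = {}
--         for v, n in frontier.items():
--             if v >= end:
--                 continue
--             for w in (v + 1, v + 4, v * 2):
--                 if w <= end:
--                     nxt[w] = nxt.get(w, 0) + n
--         frontier = nxt
--     return frontier.get(end, 0)
-- ===== Notes on version B (the rewrite author's own statement) =====
-- stated objective: alternative
-- what changed: Replaced the 3-way recursion tree with an iterative level-by-level DP that keeps a counter {value: number_of_paths} for each step, merging paths that reach the same value, with an early exit once the frontier is empty.
import Mathlib
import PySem

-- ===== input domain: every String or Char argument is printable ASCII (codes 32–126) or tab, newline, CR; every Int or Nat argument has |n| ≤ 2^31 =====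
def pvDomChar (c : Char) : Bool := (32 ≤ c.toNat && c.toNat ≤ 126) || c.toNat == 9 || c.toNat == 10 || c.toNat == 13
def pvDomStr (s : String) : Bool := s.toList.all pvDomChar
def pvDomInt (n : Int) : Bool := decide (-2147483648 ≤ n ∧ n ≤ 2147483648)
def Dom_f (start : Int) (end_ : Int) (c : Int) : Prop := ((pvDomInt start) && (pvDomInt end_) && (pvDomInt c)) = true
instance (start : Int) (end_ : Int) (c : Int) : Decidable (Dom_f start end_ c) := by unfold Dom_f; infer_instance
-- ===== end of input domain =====

-- B replaces A's 3-way recursion tree by an iterative per-step counter of reachable values (alternative algorithm); A and B agree on all inputs where A returns.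

-- ===== PORT A =====
-- A is a recursion whose values strictly increase only when start ≥ 1; on the inputs Pre_f
-- admits the recursion depth is bounded by (end_ - start), so fuel (end_-start).toNat + 1 is
-- exact there; the fuel-out value 0 is only reachable outside Pre_f (where Python A diverges).
def fA (fuel : Nat) (start : Int) (end_ : Int) (c : Int) : Int :=
  match fuel with
  | 0 => 0
  | Nat.succ fuel =>
    if start > end_ then 0
    else if start = end_ ∧ c = 7 then 1
    else if start = end_ then 0
    else fA fuel (start + 1) end_ (c + 1) + fA fuel (start + 4) end_ (c + 1)
         + fA fuel (start * 2) end_ (c + 1)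

def f (start : Int) (end_ : Int) (c : Int) : Int :=
  fA ((end_ - start).toNat + 1) start end_ c

-- ===== PORT B =====
-- one inner-loop body: `if w <= end: nxt[w] = nxt.get(w, 0) + n`
def insStep (end_ n : Int) (d : PySem.Dict Int Int) (w : Int) : PySem.Dict Int Int :=
  if w ≤ end_ then d.insert w (d.getD w 0 + n) else d

-- one iteration of `for v, n in frontier.items(): ...`
def itemStep (end_ : Int) (d : PySem.Dict Int Int) (p : Int × Int) : PySem.Dict Int Int :=
  if p.1 ≥ end_ then d
  else [p.1 + 1, p.1 + 4, p.1 * 2].foldl (insStep end_ p.2) d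

-- body of `for _ in range(7 - c)`: build nxt from frontier
def stepFrontier (end_ : Int) (fr : PySem.Dict Int Int) : PySem.Dict Int Int :=
  fr.items.foldl (itemStep end_) PySem.Dict.empty

-- the `for _ in range(7 - c)` loop with its `if not frontier: break`
def loopB (end_ : Int) : Nat → PySem.Dict Int Int → PySem.Dict Int Int
  | 0, fr => fr
  | Nat.succ n, fr => if fr.items.isEmpty then fr else loopB end_ n (stepFrontier end_ fr)

def f_alt (start : Int) (end_ : Int) (c : Int) : Int :=
  if start > end_ then 0
  else if start = end_ then (if c = 7 then 1 else 0)
  else if 7 ≤ c then 0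
  else (loopB end_ (7 - c).toNat ((PySem.Dict.empty).insert start 1)).getD end_ 0

-- ===== PRECONDITION & SPEC =====
-- Pre_f excludes the inputs on which Python A raises RecursionError instead of returning:
-- start ≤ 0 with start < end_ (the doubling move never carries a non-positive start past end,
-- so the recursion never terminates), and end_ - start > 900 (the +1 chain alone nests one
-- frame per unit of end_ - start, overrunning CPython's recursion limit of 1000).
def Pre_f (start : Int) (end_ : Int) (c : Int) : Prop :=
  end_ ≤ start ∨ (1 ≤ start ∧ end_ - start ≤ 900)
instance (start : Int) (end_ : Int) (c : Int) : Decidable (Pre_f start end_ c) := by unfold Pre_f; infer_instance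
def pvWitness_f : Int × Int × Int := (1, 3, 5)
def Spec_f (start : Int) (end_ : Int) (c : Int) (out : Int) : Prop := out = f_alt start end_ c
instance (start : Int) (end_ : Int) (c : Int) (out : Int) : Decidable (Spec_f start end_ c out) := by unfold Spec_f; infer_instance

-- ===== CLAIM (what is proved, stated in full; the proofs are below) =====
def Claim_equal_f : Prop := ∀ (start : Int) (end_ : Int) (c : Int), Dom_f start end_ c → Pre_f start end_ c → Spec_f start end_ c (f start end_ c)

-- ===== LEMMAS AND PROOFS =====

-- (everything below is proof machinery)

lemma fA_succ (fuel : Nat) (start end_ c : Int) :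
    fA (fuel + 1) start end_ c
      = if start > end_ then 0
        else if start = end_ ∧ c = 7 then 1
        else if start = end_ then 0
        else fA fuel (start + 1) end_ (c + 1) + fA fuel (start + 4) end_ (c + 1)
             + fA fuel (start * 2) end_ (c + 1) := rfl

lemma fA_fuel_irrel (end_ : Int) :
    ∀ (fuel1 fuel2 : Nat) (start c : Int), 1 ≤ start →
      (end_ - start).toNat < fuel1 → (end_ - start).toNat < fuel2 →
      fA fuel1 start end_ c = fA fuel2 start end_ c := by
  intro fuel1
  induction fuel1 with
  | zero => intro fuel2 start c _ h1 _; omega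
  | succ n ih =>
    intro fuel2 start c hs h1 h2
    cases fuel2 with
    | zero => omega
    | succ k =>
      rw [fA_succ, fA_succ]
      by_cases hgt : start > end_
      · rw [if_pos hgt, if_pos hgt]
      · by_cases heq : start = end_
        · by_cases hc : c = 7 <;> simp [heq, hc]
        · have hand : ¬ (start = end_ ∧ c = 7) := fun h => heq h.1
          rw [if_neg hgt, if_neg hgt, if_neg hand, if_neg hand, if_neg heq, if_neg heq]
          rw [ih k (start + 1) (c + 1) (by omega) (by omega) (by omega),
              ih k (start + 4) (c + 1) (by omega) (by omega) (by omega),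
              ih k (start * 2) (c + 1) (by omega) (by omega) (by omega)]

lemma f_of_gt (start end_ c : Int) (h : end_ < start) : f start end_ c = 0 := by
  rw [f, fA_succ, if_pos h]

lemma f_of_eq (start c : Int) : f start start c = if c = 7 then 1 else 0 := by
  rw [f, fA_succ]
  by_cases hc : c = 7 <;> simp [hc]

lemma f_rec (start end_ c : Int) (hs : 1 ≤ start) (hlt : start < end_) :
    f start end_ c
      = f (start + 1) end_ (c + 1) + f (start + 4) end_ (c + 1) + f (start * 2) end_ (c + 1) := by
  have e1 := fA_fuel_irrel end_ ((end_ - start).toNat) ((end_ - (start + 1)).toNat + 1)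
    (start + 1) (c + 1) (by omega) (by omega) (by omega)
  have e2 := fA_fuel_irrel end_ ((end_ - start).toNat) ((end_ - (start + 4)).toNat + 1)
    (start + 4) (c + 1) (by omega) (by omega) (by omega)
  have e3 := fA_fuel_irrel end_ ((end_ - start).toNat) ((end_ - (start * 2)).toNat + 1)
    (start * 2) (c + 1) (by omega) (by omega) (by omega)
  have hgt : ¬ start > end_ := by omega
  have heq : ¬ start = end_ := by omega
  have hand : ¬ (start = end_ ∧ c = 7) := fun h => heq h.1
  simp only [f]
  rw [fA_succ, if_neg hgt, if_neg hand, if_neg heq, e1, e2, e3]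

-- once the counter has passed 7 the answer is 0 everywhere (start ≥ 1)
lemma f_high (end_ : Int) :
    ∀ (m : Nat) (start c : Int), (end_ - start).toNat = m → 1 ≤ start → 7 < c →
      f start end_ c = 0 := by
  intro m
  induction m using Nat.strong_induction_on with
  | _ m ih =>
    intro start c hm hs hc
    by_cases hgt : end_ < start
    · exact f_of_gt _ _ _ hgt
    · by_cases heq : start = end_
      · subst heq; simp [f_of_eq, show ¬ c = 7 by omega]
      · have hlt : start < end_ := by omega
        rw [f_rec start end_ c hs hlt]
        rw [ih (end_ - (start + 1)).toNat (by omega) (start + 1) (c + 1) rfl (by omega) (by omega),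
            ih (end_ - (start + 4)).toNat (by omega) (start + 4) (c + 1) rfl (by omega) (by omega),
            ih (end_ - (start * 2)).toNat (by omega) (start * 2) (c + 1) rfl (by omega) (by omega)]
        norm_num

lemma f_seven0 (start end_ c : Int) (hs : 1 ≤ start) (hlt : start < end_) (hc : 7 ≤ c) :
    f start end_ c = 0 := by
  rw [f_rec start end_ c hs hlt,
      f_high end_ _ (start + 1) (c + 1) rfl (by omega) (by omega),
      f_high end_ _ (start + 4) (c + 1) rfl (by omega) (by omega),
      f_high end_ _ (start * 2) (c + 1) rfl (by omega) (by omega)]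
  norm_num

-- weighted sum of A-values over an association list
def dsum (end_ c : Int) (l : List (Int × Int)) : Int :=
  (l.map (fun p => p.2 * f p.1 end_ c)).sum

lemma dsum_nil (end_ c : Int) : dsum end_ c [] = 0 := rfl

lemma dsum_cons (end_ c : Int) (p : Int × Int) (l : List (Int × Int)) :
    dsum end_ c (p :: l) = p.2 * f p.1 end_ c + dsum end_ c l := by
  simp [dsum]

lemma sum_map_replace (g : Int → Int) (k v₀ n : Int) :
    ∀ (l : List (Int × Int)), (l.map (·.1)).Nodup → (k, v₀) ∈ l →
      ((l.map (fun p => if p.1 == k then (k, v₀ + n) else p)).map (fun p => p.2 * g p.1)).sum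
        = (l.map (fun p => p.2 * g p.1)).sum + n * g k := by
  intro l
  induction l with
  | nil => intro _ h; simp at h
  | cons p t ih =>
    intro hnd hm
    simp only [List.map_cons, List.nodup_cons, List.mem_map] at hnd
    by_cases hpk : p.1 = k
    · have hpv : p = (k, v₀) := by
        rcases List.mem_cons.mp hm with hm | hm
        · exact hm.symm
        · exact absurd ⟨(k, v₀), hm, by simp [hpk]⟩ hnd.1
      have ht : t.map (fun q => if q.1 == k then (k, v₀ + n) else q) = t := by
        have hcg : ∀ q ∈ t, (fun q : Int × Int => if q.1 == k then (k, v₀ + n) else q) q = id q := by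
          intro q hq
          have hqk : ¬ q.1 = k := fun h => hnd.1 ⟨q, hq, by rw [h, hpk]⟩
          simp [hqk]
        rw [List.map_congr_left hcg, List.map_id]
      simp only [List.map_cons, ht, hpk, beq_self_eq_true, if_true, List.sum_cons, hpv]
      ring
    · have hm' : (k, v₀) ∈ t := by
        rcases List.mem_cons.mp hm with hm | hm
        · exact absurd (congrArg Prod.fst hm).symm hpk
        · exact hm
      have hne : ¬ (p.1 == k) = true := by simp [hpk]
      simp only [List.map_cons, List.sum_cons, if_neg hne]
      rw [ih hnd.2 hm']
      ring

lemma dsum_insert (end_ c : Int) (d : PySem.Dict Int Int) (hnd : d.keys.Nodup) (k n : Int) :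
    dsum end_ c (d.insert k (d.getD k 0 + n)).items
      = dsum end_ c d.items + n * f k end_ c := by
  by_cases hct : d.contains k = true
  · have hsome : ∃ v₀, d.get? k = some v₀ := by
      cases hg : d.get? k with
      | none => rw [PySem.Dict.get?_eq_none_iff_contains d k] at hg; simp [hg] at hct
      | some v => exact ⟨v, rfl⟩
    obtain ⟨v₀, hg⟩ := hsome
    have hgetD : d.getD k 0 = v₀ := PySem.Dict.getD_of_get?_eq_some d 0 hg
    have hmem : (k, v₀) ∈ d.items := PySem.Dict.mem_items_of_get?_eq_some d hg
    rw [hgetD, PySem.Dict.items_insert_of_contains d (v₀ + n) hct]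
    simp only [dsum]
    exact sum_map_replace (fun x => f x end_ c) k v₀ n d.items hnd hmem
  · have hct' : d.contains k = false := by simpa using hct
    rw [PySem.Dict.items_insert_of_not_contains d _ hct', PySem.Dict.getD_of_not_contains d 0 hct']
    simp [dsum]

-- effect of one inner insert (`if w <= end: nxt[w] = nxt.get(w,0) + n`) on the invariant
lemma insStep_inv (end_ c : Int) (d : PySem.Dict Int Int) (w n : Int) (hw : 1 ≤ w)
    (hnd : d.keys.Nodup) (hg : ∀ q ∈ d.items, 1 ≤ q.1 ∧ q.1 ≤ end_) :
    (insStep end_ n d w).keys.Nodup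
    ∧ (∀ q ∈ (insStep end_ n d w).items, 1 ≤ q.1 ∧ q.1 ≤ end_)
    ∧ dsum end_ c (insStep end_ n d w).items = dsum end_ c d.items + n * f w end_ c := by
  unfold insStep
  by_cases hle : w ≤ end_
  · simp only [hle, if_true]
    refine ⟨PySem.Dict.nodup_keys_insert d _ _ hnd, ?_, dsum_insert end_ c d hnd w n⟩
    intro q hq
    rw [PySem.Dict.mem_items_insert d _ _ q] at hq
    rcases hq with hq | hq
    · subst hq; exact ⟨hw, hle⟩
    · exact hg q hq.1
  · simp only [hle, if_false]
    refine ⟨hnd, hg, ?_⟩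
    rw [f_of_gt w end_ c (by omega)]
    ring

-- effect of one frontier item on the invariant
lemma itemStep_inv (end_ c : Int) (hc : c < 7) (p : Int × Int)
    (hp : 1 ≤ p.1 ∧ p.1 ≤ end_) (d : PySem.Dict Int Int)
    (hnd : d.keys.Nodup) (hg : ∀ q ∈ d.items, 1 ≤ q.1 ∧ q.1 ≤ end_) :
    (itemStep end_ d p).keys.Nodup
    ∧ (∀ q ∈ (itemStep end_ d p).items, 1 ≤ q.1 ∧ q.1 ≤ end_)
    ∧ dsum end_ (c + 1) (itemStep end_ d p).items
        = dsum end_ (c + 1) d.items + p.2 * f p.1 end_ c := by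
  unfold itemStep
  by_cases hge : p.1 ≥ end_
  · have hpe : p.1 = end_ := by omega
    simp only [hge, if_true]
    refine ⟨hnd, hg, ?_⟩
    rw [hpe, f_of_eq end_ c, if_neg (by omega)]
    ring
  · simp only [hge, if_false, List.foldl]
    obtain ⟨h1, h2, h3⟩ := insStep_inv end_ (c + 1) d (p.1 + 1) p.2 (by omega) hnd hg
    obtain ⟨h4, h5, h6⟩ := insStep_inv end_ (c + 1) _ (p.1 + 4) p.2 (by omega) h1 h2
    obtain ⟨h7, h8, h9⟩ := insStep_inv end_ (c + 1) _ (p.1 * 2) p.2 (by omega) h4 h5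
    refine ⟨h7, h8, ?_⟩
    rw [h9, h6, h3, f_rec p.1 end_ c hp.1 (by omega)]
    ring

-- the whole `for v, n in frontier.items()` loop
lemma foldl_items_inv (end_ c : Int) (hc : c < 7) :
    ∀ (l : List (Int × Int)), (∀ q ∈ l, 1 ≤ q.1 ∧ q.1 ≤ end_) →
      ∀ (d : PySem.Dict Int Int), d.keys.Nodup → (∀ q ∈ d.items, 1 ≤ q.1 ∧ q.1 ≤ end_) →
        (l.foldl (itemStep end_) d).keys.Nodup
        ∧ (∀ q ∈ (l.foldl (itemStep end_) d).items, 1 ≤ q.1 ∧ q.1 ≤ end_)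
        ∧ dsum end_ (c + 1) (l.foldl (itemStep end_) d).items
            = dsum end_ (c + 1) d.items + dsum end_ c l := by
  intro l
  induction l with
  | nil => intro _ d hnd hg; exact ⟨hnd, hg, by simp [dsum]⟩
  | cons p t ih =>
    intro hl d hnd hg
    obtain ⟨h1, h2, h3⟩ := itemStep_inv end_ c hc p (hl p (by simp)) d hnd hg
    obtain ⟨h4, h5, h6⟩ := ih (fun q hq => hl q (by simp [hq])) _ h1 h2
    refine ⟨h4, h5, ?_⟩
    rw [List.foldl_cons] at *
    rw [h6, h3, dsum_cons]
    ring

lemma empty_items : (PySem.Dict.empty : PySem.Dict Int Int).items = [] := rfl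

lemma stepFrontier_inv (end_ c : Int) (hc : c < 7) (fr : PySem.Dict Int Int)
    (hnd : fr.keys.Nodup) (hg : ∀ q ∈ fr.items, 1 ≤ q.1 ∧ q.1 ≤ end_) :
    (stepFrontier end_ fr).keys.Nodup
    ∧ (∀ q ∈ (stepFrontier end_ fr).items, 1 ≤ q.1 ∧ q.1 ≤ end_)
    ∧ dsum end_ (c + 1) (stepFrontier end_ fr).items = dsum end_ c fr.items := by
  obtain ⟨h1, h2, h3⟩ := foldl_items_inv end_ c hc fr.items hg PySem.Dict.empty
    PySem.Dict.nodup_keys_empty (by simp [empty_items])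
  exact ⟨h1, h2, by rw [stepFrontier, h3, empty_items, dsum_nil]; ring⟩

lemma sum_if_eq (e : Int) :
    ∀ (l : List (Int × Int)), (l.map (·.1)).Nodup →
      ∀ v₀, (e, v₀) ∈ l → (l.map (fun p => if p.1 = e then p.2 else 0)).sum = v₀ := by
  intro l
  induction l with
  | nil => intro _ v₀ h; simp at h
  | cons p t ih =>
    intro hnd v₀ hm
    simp only [List.map_cons, List.nodup_cons, List.mem_map] at hnd
    by_cases hpe : p.1 = e
    · have hpv : p = (e, v₀) := by
        rcases List.mem_cons.mp hm with hm | hm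
        · exact hm.symm
        · exact absurd ⟨(e, v₀), hm, by simp [hpe]⟩ hnd.1
      have ht : (t.map (fun p => if p.1 = e then p.2 else 0)).sum = 0 := by
        rw [List.sum_eq_zero]
        intro x hx
        simp only [List.mem_map] at hx
        obtain ⟨q, hq, hqx⟩ := hx
        have hqe : ¬ q.1 = e := fun h => hnd.1 ⟨q, hq, by rw [h, hpe]⟩
        rw [if_neg hqe] at hqx
        omega
      simp [hpe, ht, hpv]
    · have hm' : (e, v₀) ∈ t := by
        rcases List.mem_cons.mp hm with hm | hm
        · exact absurd (congrArg Prod.fst hm).symm hpe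
        · exact hm
      simp only [List.map_cons, List.sum_cons, if_neg hpe]
      rw [ih hnd.2 v₀ hm']
      ring

lemma getD_eq_sum (e : Int) (d : PySem.Dict Int Int) (hnd : d.keys.Nodup) :
    (d.items.map (fun p => if p.1 = e then p.2 else 0)).sum = d.getD e 0 := by
  have hkeys : d.keys = d.items.map (·.1) := by simp only [PySem.Dict.keys]
  cases hg : d.get? e with
  | none =>
    rw [PySem.Dict.getD_of_get?_eq_none d 0 hg]
    rw [PySem.Dict.get?_eq_none_iff_not_mem_keys d e] at hg
    rw [List.sum_eq_zero]
    intro x hx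
    simp only [List.mem_map] at hx
    obtain ⟨q, hq, hqx⟩ := hx
    have : q.1 ≠ e := by
      intro h
      exact hg (by rw [hkeys]; exact List.mem_map.mpr ⟨q, hq, h⟩)
    simp [this] at hqx
    omega
  | some v =>
    rw [PySem.Dict.getD_of_get?_eq_some d 0 hg]
    exact sum_if_eq e d.items (hkeys ▸ hnd) v (PySem.Dict.mem_items_of_get?_eq_some d hg)

lemma dsum_seven (end_ : Int) (d : PySem.Dict Int Int) (hnd : d.keys.Nodup)
    (hg : ∀ q ∈ d.items, 1 ≤ q.1 ∧ q.1 ≤ end_) :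
    dsum end_ 7 d.items = d.getD end_ 0 := by
  rw [← getD_eq_sum end_ d hnd]
  unfold dsum
  congr 1
  apply List.map_congr_left
  intro q hq
  obtain ⟨hq1, hq2⟩ := hg q hq
  by_cases hqe : q.1 = end_
  · rw [hqe, f_of_eq end_ 7, if_pos rfl, if_pos rfl]; ring
  · rw [f_seven0 q.1 end_ 7 hq1 (by omega) (by omega), if_neg hqe]; ring

lemma getD_of_items_nil (e : Int) (d : PySem.Dict Int Int) (h : d.items = []) :
    d.getD e 0 = 0 := by
  apply PySem.Dict.getD_of_get?_eq_none d 0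
  rw [PySem.Dict.get?_eq_none_iff_not_mem_keys d e]
  simp only [PySem.Dict.keys, h, List.map_nil, List.not_mem_nil, not_false_eq_true]

lemma loopB_inv (end_ : Int) :
    ∀ (n : Nat) (fr : PySem.Dict Int Int), fr.keys.Nodup →
      (∀ q ∈ fr.items, 1 ≤ q.1 ∧ q.1 ≤ end_) →
      (loopB end_ n fr).getD end_ 0 = dsum end_ (7 - (n : Int)) fr.items := by
  intro n
  induction n with
  | zero =>
    intro fr hnd hg
    simpa using (dsum_seven end_ fr hnd hg).symm
  | succ n ih =>
    intro fr hnd hg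
    unfold loopB
    by_cases he : fr.items.isEmpty = true
    · rw [List.isEmpty_iff] at he
      simp only [he, List.isEmpty_nil, if_true]
      rw [getD_of_items_nil end_ fr he, dsum_nil]
    · rw [if_neg he]
      obtain ⟨h1, h2, h3⟩ := stepFrontier_inv end_ (7 - ((n : Int) + 1)) (by omega) fr hnd hg
      rw [ih _ h1 h2]
      have harith : (7 : Int) - (n : Int) = (7 - ((n : Int) + 1)) + 1 := by ring
      rw [harith, h3]
      push_cast
      ring_nf

-- ===== VERDICT (by name: the statement is the Claim_ definition above) =====
theorem f_spec : Claim_equal_f := by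
  unfold Claim_equal_f Spec_f
  intro start end_ c _ hpre
  by_cases hgt : start > end_
  · rw [f_of_gt start end_ c hgt]
    unfold f_alt
    rw [if_pos hgt]
  · by_cases heq : start = end_
    · subst heq
      rw [f_of_eq start c]
      unfold f_alt
      rw [if_neg hgt, if_pos rfl]
    · have hlt : start < end_ := by omega
      have hs : 1 ≤ start := by
        rcases hpre with h | h
        · omega
        · exact h.1
      by_cases hc : 7 ≤ c
      · rw [f_seven0 start end_ c hs hlt hc]
        unfold f_alt
        rw [if_neg hgt, if_neg heq, if_pos hc]
      · unfold f_alt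
        rw [if_neg hgt, if_neg heq, if_neg hc]
        have hitems : ((PySem.Dict.empty : PySem.Dict Int Int).insert start 1).items
            = [(start, 1)] := by
          rw [PySem.Dict.items_insert_of_not_contains _ _ (PySem.Dict.contains_empty start)]
          rw [empty_items]
          rfl
        have hnd : ((PySem.Dict.empty : PySem.Dict Int Int).insert start 1).keys.Nodup := by
          simp only [PySem.Dict.keys, hitems]
          simp
        rw [loopB_inv end_ ((7 - c).toNat) _ hnd (by
          intro q hq
          rw [hitems] at hq
          simp at hq
          subst hq
          exact ⟨hs, by omega⟩)]
        rw [hitems]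
        have : ((7 - c).toNat : Int) = 7 - c := by omega
        rw [this, dsum_cons, dsum_nil]
        have : (7 : Int) - (7 - c) = c := by ring
        rw [this]
        ring
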